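-- pv_equiv track=rewrite | github.com/Doldolee/MORE-CLEAR | dataset/util.py | extract_background_next_notes
-- ===== SOURCE A (Python) =====
-- def extract_background_next_notes(next_notes, notes, done, missing='no clinical note'):
--
--     backgrounds = []
--     first_valid = None
--
--     for nxt, cur, is_done in zip(next_notes, notes, done):
--         if first_valid is None and nxt != missing:
--             first_valid = nxt
--
--         if first_valid is None:
--             backgrounds.append(missing)
--         else:
--             backgrounds.append(f"[context] {first_valid}")
--         if is_done:
--             first_valid = None
--
--     return backgrounds
-- ===== SOURCE B (Python) =====
-- def _fill(seg, missing):
--     # one closed segment: missing before the first valid next-note, then [context] first_valid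
--     for k, x in enumerate(seg):
--         if x != missing:
--             return [missing] * k + [f"[context] {x}"] * (len(seg) - k)
--     return [missing] * len(seg)
--
--
-- def extract_background_next_notes(next_notes, notes, done, missing='no clinical note'):
--     out = []
--     seg = []
--     for nxt, cur, is_done in zip(next_notes, notes, done):
--         seg.append(nxt)
--         if is_done:
--             out.extend(_fill(seg, missing))
--             seg = []
--     if seg:
--         out.extend(_fill(seg, missing))
--     return out
-- ===== Notes on version B (the rewrite author's own statement) =====
-- stated objective: alternative
-- what changed: Replaces the running first_valid state machine with a group-then-fill decomposition: segments are collected up to each done flag (plus a trailing flush) and each closed segment is filled in one step from its first valid next-note.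
import Mathlib
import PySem

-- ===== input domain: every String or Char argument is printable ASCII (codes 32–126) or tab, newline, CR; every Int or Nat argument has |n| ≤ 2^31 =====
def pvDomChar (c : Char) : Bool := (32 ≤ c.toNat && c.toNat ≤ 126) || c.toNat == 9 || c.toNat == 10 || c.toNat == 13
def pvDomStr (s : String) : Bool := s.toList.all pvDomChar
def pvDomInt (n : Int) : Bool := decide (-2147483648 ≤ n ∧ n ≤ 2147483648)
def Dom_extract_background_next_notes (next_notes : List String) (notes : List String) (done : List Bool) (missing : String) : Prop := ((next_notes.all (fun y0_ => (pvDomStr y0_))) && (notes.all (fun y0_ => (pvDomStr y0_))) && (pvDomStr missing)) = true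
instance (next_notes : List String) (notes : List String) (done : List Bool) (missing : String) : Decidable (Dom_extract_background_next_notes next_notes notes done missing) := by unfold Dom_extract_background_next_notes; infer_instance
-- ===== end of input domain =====

-- B replaces A's running first_valid state machine by a group-then-fill decomposition
-- (segments closed at each done flag, plus a trailing flush); return values are equal.

-- ===== PORT A =====
def extract_background_next_notes (next_notes : List String) (notes : List String) (done : List Bool) (missing : String) : List String :=
  -- for nxt, cur, is_done in zip(next_notes, notes, done): running (backgrounds, first_valid)
  (((next_notes.zip notes).zip done).foldl
    (fun (acc : List String × Option String) e =>
      let nxt := e.1.1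
      let is_done := e.2
      let first_valid := if acc.2 = none ∧ nxt ≠ missing then some nxt else acc.2
      let backgrounds :=
        match first_valid with
        | none => acc.1 ++ [missing]
        | some v => acc.1 ++ ["[context] " ++ v]
      (backgrounds, if is_done then none else first_valid))
    ([], none)).1

-- ===== PORT B =====
-- _fill: scan for the first valid element, then emit the two constant blocks
def pvFill (missing : String) : List String → List String
  | [] => []
  | x :: rest =>
    if x ≠ missing then ("[context] " ++ x) :: List.replicate rest.length ("[context] " ++ x)
    else missing :: pvFill missing rest

def extract_background_next_notes_alt (next_notes : List String) (notes : List String) (done : List Bool) (missing : String) : List String :=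
  let r := ((next_notes.zip notes).zip done).foldl
    (fun (acc : List String × List String) e =>
      let seg := acc.2 ++ [e.1.1]
      if e.2 then (acc.1 ++ pvFill missing seg, []) else (acc.1, seg))
    ([], [])
  if r.2 = [] then r.1 else r.1 ++ pvFill missing r.2

-- ===== PRECONDITION & SPEC =====
def Spec_extract_background_next_notes (next_notes : List String) (notes : List String) (done : List Bool) (missing : String) (out : List String) : Prop := out = extract_background_next_notes_alt next_notes notes done missing
instance (next_notes : List String) (notes : List String) (done : List Bool) (missing : String) (out : List String) : Decidable (Spec_extract_background_next_notes next_notes notes done missing out) := by unfold Spec_extract_background_next_notes; infer_instance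

-- ===== CLAIM (what is proved, stated in full; the proofs are below) =====
def Claim_equal_extract_background_next_notes : Prop := ∀ (next_notes : List String) (notes : List String) (done : List Bool) (missing : String), Dom_extract_background_next_notes next_notes notes done missing → Spec_extract_background_next_notes next_notes notes done missing (extract_background_next_notes next_notes notes done missing)

-- ===== LEMMAS AND PROOFS =====

-- proof-side recursive views of the two folds
def emitOpt (missing : String) : Option String → String
  | none => missing
  | some v => "[context] " ++ v

def loopA (missing : String) : List ((String × String) × Bool) → Option String → List String
  | [], _ => []
  | e :: rest, fv =>
    let fv' := if fv = none ∧ e.1.1 ≠ missing then some e.1.1 else fv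
    emitOpt missing fv' :: loopA missing rest (if e.2 then none else fv')

def loopB (missing : String) : List ((String × String) × Bool) → List String → List String
  | [], seg => if seg = [] then [] else pvFill missing seg
  | e :: rest, seg =>
    let seg' := seg ++ [e.1.1]
    if e.2 then pvFill missing seg' ++ loopB missing rest [] else loopB missing rest seg'

def findValid (missing : String) (seg : List String) : Option String :=
  seg.find? (fun x => x != missing)

theorem foldA_eq (missing : String) :
    ∀ (l : List ((String × String) × Bool)) (bs : List String) (fv : Option String),
    (l.foldl
      (fun (acc : List String × Option String) e =>
        let nxt := e.1.1
        let is_done := e.2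
        let first_valid := if acc.2 = none ∧ nxt ≠ missing then some nxt else acc.2
        let backgrounds :=
          match first_valid with
          | none => acc.1 ++ [missing]
          | some v => acc.1 ++ ["[context] " ++ v]
        (backgrounds, if is_done then none else first_valid))
      (bs, fv)).1 = bs ++ loopA missing l fv := by
  intro l
  induction l with
  | nil => intro bs fv; simp [loopA]
  | cons e rest ih =>
    intro bs fv
    simp only [List.foldl_cons, loopA]
    cases h : (if fv = none ∧ e.1.1 ≠ missing then some e.1.1 else fv) with
    | none => simp [ih, emitOpt]
    | some v => simp [ih, emitOpt]

theorem foldB_eq (missing : String) :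
    ∀ (l : List ((String × String) × Bool)) (bs seg : List String),
    (let r := l.foldl
        (fun (acc : List String × List String) e =>
          let seg := acc.2 ++ [e.1.1]
          if e.2 then (acc.1 ++ pvFill missing seg, []) else (acc.1, seg))
        (bs, seg)
     if r.2 = [] then r.1 else r.1 ++ pvFill missing r.2) = bs ++ loopB missing l seg := by
  intro l
  induction l with
  | nil =>
    intro bs seg
    cases seg <;> simp [loopB, pvFill]
  | cons e rest ih =>
    intro bs seg
    simp only [List.foldl_cons, loopB]
    by_cases hd : e.2 <;> simp [hd, ih]

theorem findValid_append (missing x : String) (seg : List String) :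
    findValid missing (seg ++ [x]) =
      match findValid missing seg with
      | some v => some v
      | none => if x ≠ missing then some x else none := by
  unfold findValid
  rw [List.find?_append]
  cases h : seg.find? (fun y => y != missing) with
  | some v => simp
  | none =>
    by_cases hx : x = missing
    · simp [hx, List.find?]
    · simp only [Option.or, List.find?_cons,
        show (x != missing) = true from by simp [hx]]
      simp [hx]

theorem findValid_cons_miss (missing : String) (l : List String) :
    findValid missing (missing :: l) = findValid missing l := by
  simp [findValid, List.find?]

theorem findValid_cons_hit (missing y : String) (hy : y ≠ missing) (l : List String) :
    findValid missing (y :: l) = some y := by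
  unfold findValid
  rw [List.find?_cons, show (y != missing) = true from by simp [hy]]

theorem pvFill_append (missing x : String) (seg : List String) :
    pvFill missing (seg ++ [x]) =
      pvFill missing seg ++ [emitOpt missing (findValid missing (seg ++ [x]))] := by
  induction seg with
  | nil =>
    by_cases hx : x = missing <;>
      simp [pvFill, findValid, List.find?, hx, emitOpt]
  | cons y seg ih =>
    by_cases hy : y = missing
    · simp [pvFill, hy, ih, findValid_cons_miss]
    · simp [pvFill, hy, emitOpt, List.replicate_succ', findValid_cons_hit missing y hy]

theorem loopB_eq_loopA (missing : String) :
    ∀ (l : List ((String × String) × Bool)) (seg : List String),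
    loopB missing l seg = pvFill missing seg ++ loopA missing l (findValid missing seg) := by
  intro l
  induction l with
  | nil =>
    intro seg
    cases seg <;> simp [loopB, loopA, pvFill]
  | cons e rest ih =>
    intro seg
    have hfv : (if findValid missing seg = none ∧ e.1.1 ≠ missing then some e.1.1
        else findValid missing seg) = findValid missing (seg ++ [e.1.1]) := by
      rw [findValid_append]
      cases h : findValid missing seg with
      | some v => simp
      | none => by_cases hx : e.1.1 = missing <;> simp [hx]
    simp only [loopB, loopA, hfv]
    by_cases hd : e.2
    · have h0 : findValid missing ([] : List String) = none := by simp [findValid]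
      simp [hd, ih, h0, pvFill, pvFill_append]
    · simp [hd, ih, pvFill_append]

-- ===== VERDICT (by name: the statement is the Claim_ definition above) =====
theorem extract_background_next_notes_spec : Claim_equal_extract_background_next_notes := by
  intro next_notes notes done missing _
  unfold Spec_extract_background_next_notes extract_background_next_notes extract_background_next_notes_alt
  rw [foldA_eq, foldB_eq]
  have h0 : findValid missing ([] : List String) = none := by simp [findValid]
  rw [loopB_eq_loopA]
  simp [pvFill, h0]
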